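-- pv_equiv track=rewrite | github.com/Starfox64/Pentago | src/alignements.py | checkAlignV
-- ===== SOURCE A (Python) =====
-- def checkAlignV(n, grid, p, j):
-- 	for colI in range(n):
-- 		aligned = 0
-- 		for lineI in range(n):
-- 			if grid[lineI][colI] == j:
-- 				aligned += 1
-- 			else:
-- 				aligned = 0
--
-- 			if aligned == p:
-- 				return True
-- 	return False
-- ===== SOURCE B (Python) =====
-- def checkAlignV(n, grid, p, j):
--     for colI in range(n):
--         column = [grid[lineI][colI] for lineI in range(n)]
--         longest = 0
--         i = 0
--         while i < n:
--             k = i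
--             while k < n and column[k] == column[i]:
--                 k += 1
--             if column[i] == j and k - i > longest:
--                 longest = k - i
--             i = k
--         if longest >= p:
--             return True
--     return False
-- ===== Notes on version B (the rewrite author's own statement) =====
-- stated objective: alternative
-- what changed: Per column, B materialises the column, measures the length of its longest run of j by grouping equal neighbours with a two-pointer scan, and compares that length with p, instead of A's cell-by-cell running counter tested against p at every cell; Pre_ excludes ragged grids (fewer than n rows, or a row among the first n shorter than n), where the Python programs raise IndexError.
-- intended difference: On a nonempty board (n >= 1) with a degenerate target p <= 0 — all such boards when p < 0, and the all-j n-by-n board when p = 0 — A returns False (its counter never equals a negative p, and equals 0 only after a non-j cell), while B returns True because every column trivially contains at least p <= 0 consecutive j's, the intended vacuous reading of 'p in a row'. — e.g. on checkAlignV(1, [[5]], -1, 5): A returns false, B returns true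
-- outside the precondition, e.g. on checkAlignV(3, [[1, 0, 0], [1, 0, 0], []], 2, 1): A returns True, B raises IndexError
import Mathlib
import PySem

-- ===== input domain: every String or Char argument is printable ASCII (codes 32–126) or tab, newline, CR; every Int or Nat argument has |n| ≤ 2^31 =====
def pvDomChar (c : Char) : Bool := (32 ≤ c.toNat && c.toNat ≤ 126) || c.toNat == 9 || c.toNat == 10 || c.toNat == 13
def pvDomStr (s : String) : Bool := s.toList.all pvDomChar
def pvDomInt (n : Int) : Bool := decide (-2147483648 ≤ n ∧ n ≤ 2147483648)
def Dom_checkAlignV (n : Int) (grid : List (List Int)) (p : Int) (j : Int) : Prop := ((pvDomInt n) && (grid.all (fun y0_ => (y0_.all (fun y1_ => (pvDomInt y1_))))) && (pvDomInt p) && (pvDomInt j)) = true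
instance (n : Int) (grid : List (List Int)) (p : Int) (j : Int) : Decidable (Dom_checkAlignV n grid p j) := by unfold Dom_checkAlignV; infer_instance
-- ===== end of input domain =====

-- B replaces A's cell-by-cell running counter by computing, per column, the length of the longest
-- run of j (grouping equal neighbours with a two-pointer scan) and comparing it with p
-- (objective: alternative decomposition, same O(n^2) cost); on the degenerate targets p ≤ 0 the
-- two disagree, stated below as an intended difference D_.

-- ===== PORT A =====
-- inner loop: 'for lineI in range(n)' with the running counter 'aligned' and the early return
def aCol (grid : List (List Int)) (p j colI : Int) : List Int → Int → Bool
  | [], _ => false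
  | lineI :: rest, aligned =>
    let aligned' := if PySem.List.pyGetD (PySem.List.pyGetD grid lineI []) colI 0 == j then aligned + 1 else 0
    if aligned' == p then true else aCol grid p j colI rest aligned'

-- outer loop: 'for colI in range(n)'
def aCols (n : Int) (grid : List (List Int)) (p j : Int) : List Int → Bool
  | [] => false
  | colI :: rest =>
    if aCol grid p j colI (PySem.List.pyRange 0 n 1) 0 then true else aCols n grid p j rest

def checkAlignV (n : Int) (grid : List (List Int)) (p : Int) (j : Int) : Bool :=
  aCols n grid p j (PySem.List.pyRange 0 n 1)

-- ===== PORT B =====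
-- Source B's two-pointer while loops: split off the maximal leading run of equal values, update
-- 'longest' when it is a run of j longer than the best so far, continue on the remainder
def bLongest (j : Int) : List Int → Int → Int
  | [], longest => longest
  | v :: rest, longest =>
    let run := rest.takeWhile (fun w => w == v)
    let rest' := rest.dropWhile (fun w => w == v)
    let len := (run.length : Int) + 1
    bLongest j rest' (if v == j && longest < len then len else longest)
termination_by xs => xs.length
decreasing_by
  have := (List.dropWhile_sublist (l := rest) (p := fun w => w == v)).length_le
  simp
  omega

-- 'for colI in range(n)' of Source B: build the column, compute its longest run of j, compare with p
def bCols (n : Int) (grid : List (List Int)) (p j : Int) : List Int → Bool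
  | [] => false
  | colI :: rest =>
    let col := (PySem.List.pyRange 0 n 1).map
      (fun lineI => PySem.List.pyGetD (PySem.List.pyGetD grid lineI []) colI 0)
    if p ≤ bLongest j col 0 then true else bCols n grid p j rest

def checkAlignV_alt (n : Int) (grid : List (List Int)) (p : Int) (j : Int) : Bool :=
  bCols n grid p j (PySem.List.pyRange 0 n 1)

-- ===== PRECONDITION & SPEC =====
-- Pre_ excludes grids with fewer than n rows, or with one of the first n rows shorter than n:
-- there the Python A may raise IndexError (though it can still return True when the early return
-- fires before the short row is reached — such inputs are excluded too, see the cite) and B raises.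
def Pre_checkAlignV (n : Int) (grid : List (List Int)) (p : Int) (j : Int) : Prop :=
  n ≤ (grid.length : Int) ∧ ∀ row ∈ grid.take n.toNat, n ≤ (row.length : Int)
instance (n : Int) (grid : List (List Int)) (p : Int) (j : Int) : Decidable (Pre_checkAlignV n grid p j) := by unfold Pre_checkAlignV; infer_instance

def pvWitness_checkAlignV : Int × List (List Int) × Int × Int := (2, [[1, 0], [1, 2]], 2, 1)

-- On a nonempty board with the degenerate target p ≤ 0, A answers by whether its counter ever
-- equals p (False for p < 0; for p = 0, True exactly when some cell differs from j), while B
-- answers True because every column trivially contains a run of at least p ≤ 0 consecutive j's,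
-- which is the intended vacuous reading of 'p in a row'.
def D_checkAlignV (n : Int) (grid : List (List Int)) (p : Int) (j : Int) : Prop :=
  1 ≤ n ∧ (p < 0 ∨ (p = 0 ∧ ∀ row ∈ grid.take n.toNat, ∀ x ∈ row.take n.toNat, x = j))
instance (n : Int) (grid : List (List Int)) (p : Int) (j : Int) : Decidable (D_checkAlignV n grid p j) := by unfold D_checkAlignV; infer_instance

def Spec_checkAlignV (n : Int) (grid : List (List Int)) (p : Int) (j : Int) (out : Bool) : Prop := ¬ D_checkAlignV n grid p j → out = checkAlignV_alt n grid p j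
instance (n : Int) (grid : List (List Int)) (p : Int) (j : Int) (out : Bool) : Decidable (Spec_checkAlignV n grid p j out) := by unfold Spec_checkAlignV; infer_instance

def pvDiffWitness_checkAlignV : Int × List (List Int) × Int × Int := (1, [[5]], -1, 5)
def pvDiffWitnessOut_checkAlignV : Bool × Bool := (false, true)

-- ===== CLAIM (what is proved, stated in full; the proofs are below) =====
def Claim_unchanged_checkAlignV : Prop := ∀ (n : Int) (grid : List (List Int)) (p : Int) (j : Int), Dom_checkAlignV n grid p j → Pre_checkAlignV n grid p j → Spec_checkAlignV n grid p j (checkAlignV n grid p j)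
def Claim_changed_checkAlignV : Prop := Dom_checkAlignV (pvDiffWitness_checkAlignV.1) (pvDiffWitness_checkAlignV.2.1) (pvDiffWitness_checkAlignV.2.2.1) (pvDiffWitness_checkAlignV.2.2.2) ∧ Pre_checkAlignV (pvDiffWitness_checkAlignV.1) (pvDiffWitness_checkAlignV.2.1) (pvDiffWitness_checkAlignV.2.2.1) (pvDiffWitness_checkAlignV.2.2.2) ∧ D_checkAlignV (pvDiffWitness_checkAlignV.1) (pvDiffWitness_checkAlignV.2.1) (pvDiffWitness_checkAlignV.2.2.1) (pvDiffWitness_checkAlignV.2.2.2) ∧ checkAlignV (pvDiffWitness_checkAlignV.1) (pvDiffWitness_checkAlignV.2.1) (pvDiffWitness_checkAlignV.2.2.1) (pvDiffWitness_checkAlignV.2.2.2) = pvDiffWitnessOut_checkAlignV.1 ∧ checkAlignV_alt (pvDiffWitness_checkAlignV.1) (pvDiffWitness_checkAlignV.2.1) (pvDiffWitness_checkAlignV.2.2.1) (pvDiffWitness_checkAlignV.2.2.2) = pvDiffWitnessOut_checkAlignV.2 ∧ pvDiffWitnessOut_checkAlignV.1 ≠ pvDiffWitnessOut_checkAlignV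.2
def Claim_exact_checkAlignV : Prop := ∀ (n : Int) (grid : List (List Int)) (p : Int) (j : Int), Dom_checkAlignV n grid p j → Pre_checkAlignV n grid p j → D_checkAlignV n grid p j → checkAlignV n grid p j ≠ checkAlignV_alt n grid p j

-- ===== LEMMAS AND PROOFS =====

-- the column seen through the ports' accessors
def colOf (n : Int) (grid : List (List Int)) (c : Int) : List Int :=
  (PySem.List.pyRange 0 n 1).map
    (fun lineI => PySem.List.pyGetD (PySem.List.pyGetD grid lineI []) c 0)

-- the successive values taken by A's counter along a column, started at a
def ctrs (j : Int) : List Int → Int → List Int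
  | [], _ => []
  | v :: rest, a => (if v == j then a + 1 else 0) :: ctrs j rest (if v == j then a + 1 else 0)

theorem ctrs_cons (j v : Int) (rest : List Int) (a : Int) :
    ctrs j (v :: rest) a = (if v == j then a + 1 else 0) :: ctrs j rest (if v == j then a + 1 else 0) := rfl

theorem aCol_eq_ctrs (grid : List (List Int)) (p j colI : Int) (idxs : List Int) (a : Int) :
    aCol grid p j colI idxs a =
      (ctrs j (idxs.map (fun lineI => PySem.List.pyGetD (PySem.List.pyGetD grid lineI []) colI 0)) a).contains p := by
  induction idxs generalizing a with
  | nil => simp [aCol, ctrs]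
  | cons i rest ih =>
    simp only [aCol, ctrs_cons, List.map_cons, List.contains_cons, ih]
    by_cases h : (if PySem.List.pyGetD (PySem.List.pyGetD grid i []) colI 0 == j then a + 1 else 0) = p
    · rw [h]; simp
    · rw [beq_eq_false_iff_ne.mpr h, beq_eq_false_iff_ne.mpr (Ne.symm h)]
      simp

theorem aCols_eq_any (n : Int) (grid : List (List Int)) (p j : Int) (cols : List Int) :
    aCols n grid p j cols = cols.any (fun c => (ctrs j (colOf n grid c) 0).contains p) := by
  induction cols with
  | nil => rfl
  | cons c rest ih =>
    simp only [aCols, List.any_cons, ih, aCol_eq_ctrs, colOf]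
    by_cases h : (ctrs j ((PySem.List.pyRange 0 n 1).map
        (fun lineI => PySem.List.pyGetD (PySem.List.pyGetD grid lineI []) c 0)) 0).contains p
    · simp [h]
    · simp [h]

theorem bCols_eq_any (n : Int) (grid : List (List Int)) (p j : Int) (cols : List Int) :
    bCols n grid p j cols = cols.any (fun c => decide (p ≤ bLongest j (colOf n grid c) 0)) := by
  induction cols with
  | nil => rfl
  | cons c rest ih =>
    simp only [bCols, List.any_cons, ih, colOf]
    by_cases h : p ≤ bLongest j ((PySem.List.pyRange 0 n 1).map
        (fun lineI => PySem.List.pyGetD (PySem.List.pyGetD grid lineI []) c 0)) 0 <;> simp [h]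

-- a run of j's of length L, scanned from counter value a, contributes a+1, …, a+L
theorem ctrs_j_run (j : Int) (run : List Int) : ∀ (zs : List Int) (a : Int), (∀ w ∈ run, w = j) →
    ctrs j (run ++ zs) a =
      PySem.List.pyRange (a + 1) (a + (run.length : Int) + 1) 1 ++ ctrs j zs (a + (run.length : Int)) := by
  induction run with
  | nil =>
    intro zs a _
    simp only [List.nil_append, List.length_nil, Nat.cast_zero, add_zero]
    rw [PySem.List.pyRange_one_eq_nil (le_refl _)]
    simp
  | cons w t ih =>
    intro zs a h
    have hw : (w == j) = true := by simp [h w (by simp)]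
    rw [List.cons_append, ctrs_cons, hw, if_pos rfl]
    rw [ih zs (a + 1) (fun x hx => h x (List.mem_cons_of_mem _ hx))]
    conv_rhs => rw [PySem.List.pyRange_one_cons (by simp only [List.length_cons]; push_cast; omega)]
    simp only [List.cons_append, List.length_cons]
    push_cast
    ring_nf

-- a nonempty block of non-j values contributes only 0s and leaves the counter reset
theorem ctrs_nonj (j : Int) (ys : List Int) : ∀ (zs : List Int) (a : Int), ys ≠ [] → (∀ w ∈ ys, w ≠ j) →
    ctrs j (ys ++ zs) a = List.replicate ys.length 0 ++ ctrs j zs 0 := by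
  induction ys with
  | nil => intro zs a hne _; exact absurd rfl hne
  | cons w t ih =>
    intro zs a _ h
    have h0 : (w == j) = false := beq_eq_false_iff_ne.mpr (h w (by simp))
    cases t with
    | nil => simp [ctrs_cons, h0]
    | cons u s =>
      have hrec := ih zs 0 (by simp) (fun x hx => h x (List.mem_cons_of_mem _ hx))
      rw [List.cons_append, ctrs_cons, h0]
      simp only [Bool.false_eq_true, if_false]
      rw [hrec]
      simp [List.replicate_succ]

-- the counter resets on a non-j head: the start value is irrelevant
theorem ctrs_reset (j : Int) (zs : List Int) (a b : Int)
    (h : ∀ w, zs.head? = some w → w ≠ j) : ctrs j zs a = ctrs j zs b := by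
  cases zs with
  | nil => rfl
  | cons w t =>
    have hw : (w == j) = false := beq_eq_false_iff_ne.mpr (h w rfl)
    simp [ctrs_cons, hw]

theorem head?_dropWhile_not {α : Type} (p : α → Bool) (l : List α) (x : α)
    (h : (l.dropWhile p).head? = some x) : p x = false := by
  induction l with
  | nil => simp [List.dropWhile] at h
  | cons a t ih =>
    rw [List.dropWhile_cons] at h
    by_cases hp : p a
    · rw [if_pos hp] at h; exact ih h
    · rw [if_neg hp] at h
      simp only [List.head?_cons, Option.some.injEq] at h
      rw [← h]; simpa using hp

-- per-column bridge for a positive target: B's longest-run test is A's counter-membership test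
theorem le_bLongest_iff (j p : Int) (hp : 1 ≤ p) (xs : List Int) (best : Int) :
    (p ≤ bLongest j xs best ↔ p ≤ best ∨ p ∈ ctrs j xs 0) := by
  induction xs, best using bLongest.induct j with
  | case1 best => simp [bLongest, ctrs]
  | case2 v rest best run rest' len ih =>
    have hsplit : rest.takeWhile (fun w => w == v) ++ rest.dropWhile (fun w => w == v) = rest :=
      List.takeWhile_append_dropWhile
    have hrun : ∀ w ∈ rest.takeWhile (fun w => w == v), w = v := fun w hw => by
      simpa using List.mem_takeWhile_imp hw
    have hxs : v :: rest
        = (v :: rest.takeWhile (fun w => w == v)) ++ rest.dropWhile (fun w => w == v) := by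
      rw [List.cons_append, hsplit]
    have hhead : ∀ w, (rest.dropWhile (fun w => w == v)).head? = some w → w ≠ v := by
      intro w hw
      have := head?_dropWhile_not _ _ _ hw
      simpa using this
    rw [bLongest]
    by_cases hv : v = j
    · subst hv
      have hall : ∀ w ∈ v :: rest.takeWhile (fun w => w == v), w = v := by
        intro w hw
        rcases List.mem_cons.mp hw with h | h
        · exact h
        · exact hrun w h
      conv_rhs => rw [hxs]
      rw [ctrs_j_run v _ _ 0 hall, ctrs_reset v _ _ 0 hhead]
      simp only [dite_eq_ite, beq_self_eq_true, Bool.true_and, decide_eq_true_eq] at ih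
      simp only [List.mem_append, PySem.List.mem_pyRange_one, List.length_cons, beq_self_eq_true,
        Bool.true_and, decide_eq_true_eq, zero_add]
      rw [ih]
      have hlen : len = ((rest.takeWhile (fun w => w == v)).length : Int) + 1 := rfl
      constructor
      · rintro (hb | hm)
        · split_ifs at hb with h
          · right; left
            refine ⟨hp, ?_⟩
            push_cast
            omega
          · left; exact hb
        · right; right; exact hm
      · rintro (hb | ⟨_, hlt⟩ | hm)
        · left
          split_ifs with h <;> omega
        · left
          push_cast at hlt
          split_ifs with h <;> omega
        · right; exact hm
    · have h0 : (v == j) = false := beq_eq_false_iff_ne.mpr hv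
      have hne : ∀ w ∈ v :: rest.takeWhile (fun w => w == v), w ≠ j := by
        intro w hw
        rcases List.mem_cons.mp hw with h | h
        · rw [h]; exact hv
        · rw [hrun w h]; exact hv
      conv_rhs => rw [hxs]
      rw [ctrs_nonj j _ _ 0 (by simp) hne]
      simp only [dite_eq_ite, h0, Bool.false_and, Bool.false_eq_true, if_false] at ih
      simp only [h0, Bool.false_and, Bool.false_eq_true, if_false, List.mem_append,
        List.mem_replicate]
      rw [ih]
      constructor
      · rintro (hb | hm)
        · left; exact hb
        · right; right; exact hm
      · rintro (hb | ⟨_, hp0⟩ | hm)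
        · left; exact hb
        · omega
        · right; exact hm

-- A's counter stays nonnegative: 0 appears among its values iff the column has a non-j cell
theorem zero_mem_ctrs_iff (j : Int) (xs : List Int) : ∀ (a : Int), 0 ≤ a →
    ((0 : Int) ∈ ctrs j xs a ↔ ∃ x ∈ xs, x ≠ j) := by
  induction xs with
  | nil => intro a _; simp [ctrs]
  | cons v rest ih =>
    intro a ha
    by_cases hv : v = j
    · have hw : (v == j) = true := by simp [hv]
      rw [ctrs_cons, if_pos hw]
      simp only [List.mem_cons]
      rw [ih (a + 1) (by omega)]
      constructor
      · rintro (h | h)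
        · omega
        · obtain ⟨x, hx, hxj⟩ := h; exact ⟨x, Or.inr hx, hxj⟩
      · rintro ⟨x, hx | hx, hxj⟩
        · exact absurd (hx ▸ hv) hxj
        · exact Or.inr ⟨x, hx, hxj⟩
    · have hw : (v == j) = false := beq_eq_false_iff_ne.mpr hv
      rw [ctrs_cons, if_neg (by simp [hw])]
      simp only [List.mem_cons]
      constructor
      · intro _; exact ⟨v, Or.inl rfl, hv⟩
      · intro _; exact Or.inl (by simp)

-- A's counter never goes negative
theorem neg_not_mem_ctrs (j p : Int) (hp : p < 0) (xs : List Int) : ∀ (a : Int), 0 ≤ a →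
    p ∉ ctrs j xs a := by
  induction xs with
  | nil => intro a _; simp [ctrs]
  | cons v rest ih =>
    intro a ha
    rw [ctrs_cons]
    intro hmem
    rcases List.mem_cons.mp hmem with h | h
    · split_ifs at h <;> omega
    · split_ifs at h with hv
      · exact ih (a + 1) (by omega) h
      · exact ih 0 (by omega) h

-- the running best never decreases
theorem le_bLongest_self (j : Int) (xs : List Int) (best : Int) : best ≤ bLongest j xs best := by
  induction xs, best using bLongest.induct j with
  | case1 best => simp [bLongest]
  | case2 v rest best run rest' len ih =>
    rw [bLongest]
    refine le_trans ?_ ih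
    split_ifs with h
    · simp only [Bool.and_eq_true, decide_eq_true_eq] at h
      omega
    · exact le_refl _

-- under Pre_, a cell of colOf is a cell of the n×n window, and conversely
theorem colOf_cells (n : Int) (grid : List (List Int)) (c : Int)
    (hpre : n ≤ (grid.length : Int) ∧ ∀ row ∈ grid.take n.toNat, n ≤ (row.length : Int))
    (hc0 : 0 ≤ c) (hcn : c < n) :
    ∀ x ∈ colOf n grid c, ∃ row ∈ grid.take n.toNat, ∃ y ∈ row.take n.toNat, x = y := by
  intro x hx
  simp only [colOf, List.mem_map] at hx
  obtain ⟨lineI, hmem, hval⟩ := hx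
  rw [PySem.List.mem_pyRange_one] at hmem
  obtain ⟨h0, hn⟩ := hmem
  have hlen : lineI.toNat < grid.length := by omega
  have hrow : PySem.List.pyGetD grid lineI [] = grid[lineI.toNat] :=
    PySem.List.pyGetD_eq_getElem grid [] h0 (by omega)
  have htake : lineI.toNat < (grid.take n.toNat).length := by
    simp only [List.length_take]; omega
  have hrow_take : (grid.take n.toNat)[lineI.toNat] = grid[lineI.toNat] := List.getElem_take
  have hrmem : grid[lineI.toNat] ∈ grid.take n.toNat := by
    rw [← hrow_take]; exact List.getElem_mem htake
  have hrlen : n ≤ (grid[lineI.toNat].length : Int) := hpre.2 _ hrmem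
  have hclen : c.toNat < grid[lineI.toNat].length := by omega
  have hcell : PySem.List.pyGetD grid[lineI.toNat] c 0 = grid[lineI.toNat][c.toNat] :=
    PySem.List.pyGetD_eq_getElem grid[lineI.toNat] 0 hc0 (by omega)
  refine ⟨grid[lineI.toNat], hrmem, grid[lineI.toNat][c.toNat], ?_, by rw [← hval, hrow, hcell]⟩
  have hct : c.toNat < (grid[lineI.toNat].take n.toNat).length := by
    simp only [List.length_take]; omega
  have : (grid[lineI.toNat].take n.toNat)[c.toNat] = grid[lineI.toNat][c.toNat] := List.getElem_take
  rw [← this]; exact List.getElem_mem hct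

-- under Pre_, a cell of the n×n window appears in its column's colOf
theorem cell_mem_colOf (n : Int) (grid : List (List Int))
    (hpre : n ≤ (grid.length : Int) ∧ ∀ row ∈ grid.take n.toNat, n ≤ (row.length : Int))
    (r c : Nat) (hr : (r : Int) < n) (hc : (c : Int) < n) :
    ∃ hrl : r < grid.length, ∃ hcl : c < grid[r].length, grid[r][c] ∈ colOf n grid c := by
  have hrl : r < grid.length := by omega
  have hrmem : grid[r] ∈ grid.take n.toNat := by
    have htake : r < (grid.take n.toNat).length := by simp only [List.length_take]; omega
    have : (grid.take n.toNat)[r] = grid[r] := List.getElem_take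
    rw [← this]; exact List.getElem_mem htake
  have hcl : c < grid[r].length := by
    have := hpre.2 _ hrmem; omega
  refine ⟨hrl, hcl, ?_⟩
  simp only [colOf, List.mem_map]
  refine ⟨(r : Int), ?_, ?_⟩
  · rw [PySem.List.mem_pyRange_one]; constructor <;> omega
  · have hrow : PySem.List.pyGetD grid (r : Int) [] = grid[r] := by
      have h := PySem.List.pyGetD_eq_getElem grid [] (i := (r : Int)) (by omega) (by omega)
      simpa using h
    rw [hrow]
    have h := PySem.List.pyGetD_eq_getElem grid[r] 0 (i := (c : Int)) (by omega) (by omega)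
    simpa using h

-- ===== VERDICT (by name: the statements are the Claim_ definitions above) =====
theorem checkAlignV_spec : Claim_unchanged_checkAlignV := by
  intro n grid p j _ hpre hnd
  unfold checkAlignV checkAlignV_alt
  rw [aCols_eq_any, bCols_eq_any]
  rcases lt_or_ge n 1 with hn | hn
  · rw [PySem.List.pyRange_one_eq_nil (by omega)]
    rfl
  rcases lt_trichotomy p 0 with hp | hp | hp
  · exact absurd ⟨hn, Or.inl hp⟩ hnd
  · subst hp
    have hnall : ¬ ∀ row ∈ grid.take n.toNat, ∀ x ∈ row.take n.toNat, x = j := by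
      intro hall; exact hnd ⟨hn, Or.inr ⟨rfl, hall⟩⟩
    push_neg at hnall
    obtain ⟨row, hrow, x, hx, hxj⟩ := hnall
    obtain ⟨r, hr, hrEq⟩ := List.mem_iff_getElem.mp hrow
    obtain ⟨c, hc, hcEq⟩ := List.mem_iff_getElem.mp hx
    have hrn : (r : Int) < n := by
      simp only [List.length_take] at hr
      have hr' : r < n.toNat := lt_of_lt_of_le hr (min_le_left _ _)
      omega
    have hcn : (c : Int) < n := by
      simp only [List.length_take] at hc
      have hc' : c < n.toNat := lt_of_lt_of_le hc (min_le_left _ _)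
      omega
    have hAcol : ((0 : Int) ∈ ctrs j (colOf n grid (c : Int)) 0) := by
      rw [zero_mem_ctrs_iff j _ 0 (le_refl 0)]
      obtain ⟨hrl, hcl, hmem⟩ := cell_mem_colOf n grid hpre r c hrn hcn
      refine ⟨grid[r][c], hmem, ?_⟩
      have h1 : (grid.take n.toNat)[r] = grid[r] := List.getElem_take
      have h2 : (row.take n.toNat)[c] = row[c]'(by simp only [List.length_take] at hc; omega) :=
        List.getElem_take
      have : grid[r][c] = x := by
        rw [← hcEq, h2]
        congr 1
        rw [← hrEq, h1]
      rw [this]; exact hxj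
    have hA : (PySem.List.pyRange 0 n 1).any
        (fun c => (ctrs j (colOf n grid c) 0).contains 0) = true := by
      rw [List.any_eq_true]
      exact ⟨(c : Int), by rw [PySem.List.mem_pyRange_one]; constructor <;> omega,
        by rw [List.contains_eq_mem]; simpa using hAcol⟩
    have hB : (PySem.List.pyRange 0 n 1).any
        (fun c => decide ((0 : Int) ≤ bLongest j (colOf n grid c) 0)) = true := by
      rw [List.any_eq_true]
      exact ⟨0, by rw [PySem.List.mem_pyRange_one]; constructor <;> omega,
        by simpa using le_bLongest_self j (colOf n grid 0) 0⟩
    rw [hA, hB]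
  · -- p ≥ 1: per-column equality
    have : ∀ c, ((ctrs j (colOf n grid c) 0).contains p)
        = decide (p ≤ bLongest j (colOf n grid c) 0) := by
      intro c
      have := le_bLongest_iff j p (by omega) (colOf n grid c) 0
      rw [List.contains_eq_mem]
      by_cases hm : p ∈ ctrs j (colOf n grid c) 0
      · simp only [hm, decide_true]
        symm; simp only [decide_eq_true_eq]
        exact this.mpr (Or.inr hm)
      · simp only [hm, decide_false]
        symm; simp only [decide_eq_false_iff_not]
        intro hle
        rcases this.mp hle with h | h
        · omega
        · exact hm h
    exact List.any_congr rfl (fun c => this c)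

theorem checkAlignV_changed : Claim_changed_checkAlignV := by
  unfold Claim_changed_checkAlignV
  refine ⟨by decide, by decide, by decide, by decide, ?_, by decide⟩
  show checkAlignV_alt 1 [[5]] (-1) 5 = true
  unfold checkAlignV_alt
  norm_num [bCols, bLongest, show PySem.List.pyRange 0 1 1 = ([0] : List Int) from by decide,
    show PySem.List.pyGetD ([[5]] : List (List Int)) 0 [] = [5] from by decide,
    show PySem.List.pyGetD ([5] : List Int) 0 0 = 5 from by decide,
    List.takeWhile, List.dropWhile]

theorem checkAlignV_tight : Claim_exact_checkAlignV := by
  intro n grid p j _ hpre hd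
  obtain ⟨hn, hcase⟩ := hd
  unfold checkAlignV checkAlignV_alt
  rw [aCols_eq_any, bCols_eq_any]
  have hB : (PySem.List.pyRange 0 n 1).any
      (fun c => decide (p ≤ bLongest j (colOf n grid c) 0)) = true := by
    rw [List.any_eq_true]
    refine ⟨0, by rw [PySem.List.mem_pyRange_one]; constructor <;> omega, ?_⟩
    simp only [decide_eq_true_eq]
    have h0 := le_bLongest_self j (colOf n grid 0) 0
    rcases hcase with hp | ⟨hp, _⟩ <;> omega
  have hA : (PySem.List.pyRange 0 n 1).any
      (fun c => (ctrs j (colOf n grid c) 0).contains p) = false := by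
    rw [List.any_eq_false]
    intro c hcmem
    rw [PySem.List.mem_pyRange_one] at hcmem
    rw [Bool.not_eq_true, List.contains_eq_mem, decide_eq_false_iff_not]
    rcases hcase with hp | ⟨hp, hall⟩
    · exact neg_not_mem_ctrs j p hp _ 0 (le_refl 0)
    · subst hp
      rw [zero_mem_ctrs_iff j _ 0 (le_refl 0)]
      rintro ⟨x, hx, hxj⟩
      obtain ⟨row, hrow, y, hy, hxy⟩ := colOf_cells n grid c hpre hcmem.1 hcmem.2 x hx
      exact hxj (hxy ▸ hall row hrow y hy)
  rw [hA, hB]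
  simp
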